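/-
  RFC 8259's GRAMMAR AS INFERENCE RULES, and their equivalence with the layouts of Json/Grammar.lean.

  `RendersV v t`: the text `t` is a rendering of the value `v`, no whitespace around it (one rule per production of §3 – §7);
  `RendersElems vs t` / `RendersMembers ms t`: `t` is what stands between `[` and `]` / `{` and `}`: whitespace only, or elements
  (`ws value ws`) / members (`ws string ws : ws value ws`) separated by commas; `Renders v t`: a JSON text (§2), `ws value ws`.
  Numbers and strings are not constrained here (as in `Prints`): `Value.WellFormed` is the separate condition on them.

  printsV_iff : PrintsV v t ↔ RendersV v t        prints_iff : Prints v t ↔ Renders v t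
  So `Prints`, defined in Json/Grammar.lean by "some layout of `v` renders to `t`", is exactly derivability by these rules.
-/
import Json.Grammar

namespace Json

mutual
/-- `value = false / null / true / object / array / number / string` (§3), without surrounding whitespace. -/
inductive RendersV : Value → List UInt8 → Prop
  | null : RendersV .null [0x6e, 0x75, 0x6c, 0x6c]
  | true : RendersV .true [0x74, 0x72, 0x75, 0x65]
  | false : RendersV .false [0x66, 0x61, 0x6c, 0x73, 0x65]
  | number (t : List UInt8) : RendersV (.number t) t
  | string (b : List UInt8) : RendersV (.string b) (0x22 :: b ++ [0x22])
  /-- `array = begin-array [ value *( value-separator value ) ] end-array` (§5) -/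
  | array {vs : List Value} {t : List UInt8} : RendersElems vs t → RendersV (.array vs) (0x5b :: t ++ [0x5d])
  /-- `object = begin-object [ member *( value-separator member ) ] end-object` (§4) -/
  | object {ms : List (List UInt8 × Value)} {t : List UInt8} : RendersMembers ms t → RendersV (.object ms) (0x7b :: t ++ [0x7d])
/-- What stands between `[` and `]`. -/
inductive RendersElems : List Value → List UInt8 → Prop
  | nil {w : List UInt8} : IsWs w → RendersElems [] w
  | one {w1 t w2 : List UInt8} {v : Value} : IsWs w1 → RendersV v t → IsWs w2 → RendersElems [v] (w1 ++ t ++ w2)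
  | cons {w1 t w2 t' : List UInt8} {v : Value} {vs : List Value} : IsWs w1 → RendersV v t → IsWs w2 → vs ≠ [] → RendersElems vs t' →
      RendersElems (v :: vs) (w1 ++ t ++ w2 ++ 0x2c :: t')
/-- What stands between `{` and `}`; `member = string name-separator value`. -/
inductive RendersMembers : List (List UInt8 × Value) → List UInt8 → Prop
  | nil {w : List UInt8} : IsWs w → RendersMembers [] w
  | one {w1 k w2 w3 t w4 : List UInt8} {v : Value} : IsWs w1 → IsWs w2 → IsWs w3 → RendersV v t → IsWs w4 →
      RendersMembers [(k, v)] (w1 ++ 0x22 :: k ++ 0x22 :: w2 ++ 0x3a :: w3 ++ t ++ w4)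
  | cons {w1 k w2 w3 t w4 t' : List UInt8} {v : Value} {ms : List (List UInt8 × Value)} : IsWs w1 → IsWs w2 → IsWs w3 → RendersV v t →
      IsWs w4 → ms ≠ [] → RendersMembers ms t' →
      RendersMembers ((k, v) :: ms) (w1 ++ 0x22 :: k ++ 0x22 :: w2 ++ 0x3a :: w3 ++ t ++ w4 ++ 0x2c :: t')
end

/-- `JSON-text = ws value ws` (§2). -/
inductive Renders : Value → List UInt8 → Prop
  | text {w1 t w2 : List UInt8} {v : Value} : IsWs w1 → RendersV v t → IsWs w2 → Renders v (w1 ++ t ++ w2)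

theorem IsWs.append {a b : List UInt8} (ha : IsWs a) (hb : IsWs b) : IsWs (a ++ b) := by
  intro c hc; rcases List.mem_append.mp hc with h | h
  · exact ha c h
  · exact hb c h
theorem IsWs.nil : IsWs [] := fun _ h => by simp at h

theorem Items.tail_cons (pre : List UInt8) (item : Layout) (post : List UInt8) (rest : Items) :
    (Items.cons pre item post rest).tail = 0x2c :: (Items.cons pre item post rest).text := by simp [Items.tail, Items.text]
theorem Members.tail_cons (pre key mid pre' : List UInt8) (val : Layout) (post : List UInt8) (rest : Members) :
    (Members.cons pre key mid pre' val post rest).tail = 0x2c :: (Members.cons pre key mid pre' val post rest).text := by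
  simp [Members.tail, Members.text]

/-! ### From layouts to derivations -/

mutual
theorem RendersV.of_layout : (l : Layout) → l.WsOk → RendersV l.value l.text
  | .null, _ => .null
  | .true, _ => .true
  | .false, _ => .false
  | .number t, _ => .number t
  | .string b, _ => .string b
  | .array ws items, h => by
    have := RendersElems.of_items items h.2 ws h.1
    simpa [Layout.value, Layout.text] using RendersV.array this
  | .object ws members, h => by
    have := RendersMembers.of_members members h.2 ws h.1
    simpa [Layout.value, Layout.text] using RendersV.object this
theorem RendersElems.of_items : (is : Items) → is.WsOk → ∀ w, IsWs w → RendersElems is.values (w ++ is.text)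
  | .nil, _, w, hw => by simpa [Items.values, Items.text] using RendersElems.nil hw
  | .cons pre item post rest, h, w, hw => by
    obtain ⟨hpre, hitem, hpost, hrest⟩ := h
    have hv := RendersV.of_layout item hitem
    have IH := RendersElems.of_items rest hrest [] IsWs.nil
    cases rest with
    | nil =>
      have := RendersElems.one (hw.append hpre) hv hpost
      simpa [Items.values, Items.text, Items.tail] using this
    | cons pre2 item2 post2 rest2 =>
      have := RendersElems.cons (hw.append hpre) hv hpost (by simp [Items.values]) IH
      simpa [Items.values, Items.text, Items.tail] using this
theorem RendersMembers.of_members : (ms : Members) → ms.WsOk → ∀ w, IsWs w → RendersMembers ms.values (w ++ ms.text)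
  | .nil, _, w, hw => by simpa [Members.values, Members.text] using RendersMembers.nil hw
  | .cons pre key mid pre' val post rest, h, w, hw => by
    obtain ⟨hpre, hmid, hpre', hval, hpost, hrest⟩ := h
    have hv := RendersV.of_layout val hval
    have IH := RendersMembers.of_members rest hrest [] IsWs.nil
    cases rest with
    | nil =>
      have := RendersMembers.one (k := key) (hw.append hpre) hmid hpre' hv hpost
      simpa [Members.values, Members.text, Members.tail] using this
    | cons pre2 key2 mid2 pre2' val2 post2 rest2 =>
      have := RendersMembers.cons (k := key) (hw.append hpre) hmid hpre' hv hpost (by simp [Members.values]) IH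
      simpa [Members.values, Members.text, Members.tail] using this
end

/-! ### From derivations to layouts -/

/-- Whitespace in front of elements can be taken into the first element's own leading whitespace. -/
theorem Items.absorb (w : List UInt8) (hw : IsWs w) : ∀ is : Items, is.WsOk → is.values ≠ [] →
    ∃ is' : Items, is'.WsOk ∧ is'.values = is.values ∧ is'.text = w ++ is.text
  | .nil, _, h => by simp [Items.values] at h
  | .cons pre item post rest, h, _ =>
    ⟨.cons (w ++ pre) item post rest, ⟨hw.append h.1, h.2.1, h.2.2.1, h.2.2.2⟩, by simp [Items.values], by simp [Items.text]⟩
theorem Members.absorb (w : List UInt8) (hw : IsWs w) : ∀ ms : Members, ms.WsOk → ms.values ≠ [] →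
    ∃ ms' : Members, ms'.WsOk ∧ ms'.values = ms.values ∧ ms'.text = w ++ ms.text
  | .nil, _, h => by simp [Members.values] at h
  | .cons pre key mid pre' val post rest, h, _ =>
    ⟨.cons (w ++ pre) key mid pre' val post rest, ⟨hw.append h.1, h.2.1, h.2.2.1, h.2.2.2.1, h.2.2.2.2.1, h.2.2.2.2.2⟩,
      by simp [Members.values], by simp [Members.text]⟩

mutual
theorem RendersV.layout : ∀ {v : Value} {t : List UInt8}, RendersV v t → ∃ l : Layout, l.WsOk ∧ l.value = v ∧ l.text = t
  | _, _, .null => ⟨.null, trivial, rfl, rfl⟩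
  | _, _, .true => ⟨.true, trivial, rfl, rfl⟩
  | _, _, .false => ⟨.false, trivial, rfl, rfl⟩
  | _, _, .number t => ⟨.number t, trivial, rfl, rfl⟩
  | _, _, .string b => ⟨.string b, trivial, rfl, rfl⟩
  | _, _, .array h => by
    obtain ⟨ws, is, hws, his, hv, ht⟩ := RendersElems.layout h
    exact ⟨.array ws is, ⟨hws, his⟩, by simp [Layout.value, hv], by simp [Layout.text, ht]⟩
  | _, _, .object h => by
    obtain ⟨ws, ms, hws, hms, hv, ht⟩ := RendersMembers.layout h
    exact ⟨.object ws ms, ⟨hws, hms⟩, by simp [Layout.value, hv], by simp [Layout.text, ht]⟩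
theorem RendersElems.layout : ∀ {vs : List Value} {t : List UInt8}, RendersElems vs t →
    ∃ (ws : List UInt8) (is : Items), IsWs ws ∧ is.WsOk ∧ is.values = vs ∧ t = ws ++ is.text
  | _, _, .nil hw => ⟨_, .nil, hw, trivial, rfl, by simp [Items.text]⟩
  | _, _, .one h1 hv h2 => by
    obtain ⟨l, hl, rfl, rfl⟩ := RendersV.layout hv
    exact ⟨[], .cons _ l _ .nil, IsWs.nil, ⟨h1, hl, h2, trivial⟩, rfl, by simp [Items.text, Items.tail]⟩
  | _, _, .cons h1 hv h2 hne h' => by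
    obtain ⟨l, hl, rfl, rfl⟩ := RendersV.layout hv
    obtain ⟨ws', is', hws', his', rfl, rfl⟩ := RendersElems.layout h'
    obtain ⟨is'', his'', hv'', ht''⟩ := Items.absorb ws' hws' is' his' hne
    cases is'' with
    | nil => rw [← hv''] at hne; simp [Items.values] at hne
    | cons pre2 item2 post2 rest2 =>
      refine ⟨[], .cons _ l _ (.cons pre2 item2 post2 rest2), IsWs.nil, ⟨h1, hl, h2, his''⟩, by simp [Items.values, ← hv''], ?_⟩
      rw [← ht'']; simp [Items.text, Items.tail]
theorem RendersMembers.layout : ∀ {ms : List (List UInt8 × Value)} {t : List UInt8}, RendersMembers ms t →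
    ∃ (ws : List UInt8) (mm : Members), IsWs ws ∧ mm.WsOk ∧ mm.values = ms ∧ t = ws ++ mm.text
  | _, _, .nil hw => ⟨_, .nil, hw, trivial, rfl, by simp [Members.text]⟩
  | _, _, .one (k := k) h1 h2 h3 hv h4 => by
    obtain ⟨l, hl, rfl, rfl⟩ := RendersV.layout hv
    exact ⟨[], .cons _ k _ _ l _ .nil, IsWs.nil, ⟨h1, h2, h3, hl, h4, trivial⟩, rfl, by simp [Members.text, Members.tail]⟩
  | _, _, .cons (k := k) h1 h2 h3 hv h4 hne h' => by
    obtain ⟨l, hl, rfl, rfl⟩ := RendersV.layout hv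
    obtain ⟨ws', mm', hws', hmm', rfl, rfl⟩ := RendersMembers.layout h'
    obtain ⟨mm'', hmm'', hv'', ht''⟩ := Members.absorb ws' hws' mm' hmm' hne
    cases mm'' with
    | nil => rw [← hv''] at hne; simp [Members.values] at hne
    | cons pre2 key2 mid2 pre2' val2 post2 rest2 =>
      refine ⟨[], .cons _ k _ _ l _ (.cons pre2 key2 mid2 pre2' val2 post2 rest2), IsWs.nil, ⟨h1, h2, h3, hl, h4, hmm''⟩,
        by simp [Members.values, ← hv''], ?_⟩
      rw [← ht'']; simp [Members.text, Members.tail]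
end

/-- **`PrintsV` is derivability by the rules.** -/
theorem printsV_iff (v : Value) (t : List UInt8) : PrintsV v t ↔ RendersV v t :=
  ⟨fun ⟨l, hl, hv, ht⟩ => hv ▸ ht ▸ RendersV.of_layout l hl, RendersV.layout⟩

/-- **`Prints` is derivability by the rules**: a JSON text is `ws value ws`. -/
theorem prints_iff (v : Value) (t : List UInt8) : Prints v t ↔ Renders v t := by
  constructor
  · rintro ⟨w1, l, w2, h1, h2, hl, rfl, rfl⟩
    exact .text h1 (RendersV.of_layout l hl) h2
  · rintro ⟨h1, hv, h2⟩
    obtain ⟨l, hl, rfl, rfl⟩ := RendersV.layout hv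
    exact ⟨_, l, _, h1, h2, hl, rfl, rfl⟩

end Json
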